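-- pv_equiv track=rewrite | github.com/vertica/VerticaPy | verticapy/utils/_toolbox.py | indentSQL
-- ===== SOURCE A (Python) =====
-- def indentSQL(query: str):
--     query = (
--         query.replace("SELECT", "\n   SELECT\n    ")
--         .replace("FROM", "\n   FROM\n")
--         .replace(",", ",\n    ")
--     )
--     query = query.replace("VERTICAPY_SUBTABLE", "\nVERTICAPY_SUBTABLE")
--     n = len(query)
--     return_l = []
--     j = 1
--     while j < n - 9:
--         if (
--             query[j] == "("
--             and (query[j - 1].isalnum() or query[j - 5 : j] == "OVER ")
--             and query[j + 1 : j + 7] != "SELECT"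
--         ):
--             k = 1
--             while k > 0 and j < n - 9:
--                 j += 1
--                 if query[j] == "\n":
--                     return_l += [j]
--                 elif query[j] == ")":
--                     k -= 1
--                 elif query[j] == "(":
--                     k += 1
--         else:
--             j += 1
--     query_print = ""
--     i = 0 if query[0] != "\n" else 1
--     while return_l:
--         j = return_l[0]
--         query_print += query[i:j]
--         if query[j] != "\n":
--             query_print += query[j]
--         else:
--             i = j + 1
--             while query[i] == " " and i < n - 9:
--                 i += 1
--             query_print += " "
--         del return_l[0]
--     query_print += query[i:n]
--     return query_print
-- ===== SOURCE B (Python) =====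
-- def indentSQL(query: str):
--     # One pass: scan and emit simultaneously, tracking paren depth inside
--     # qualifying regions, instead of A's collect-positions-then-rebuild.
--     query = (
--         query.replace("SELECT", "\n   SELECT\n    ")
--         .replace("FROM", "\n   FROM\n")
--         .replace(",", ",\n    ")
--         .replace("VERTICAPY_SUBTABLE", "\nVERTICAPY_SUBTABLE")
--     )
--     n = len(query)
--     out = [] if query[0] == "\n" else [query[0]]
--     depth = 0
--     p = 1
--     while p < n:
--         c = query[p]
--         if depth == 0:
--             if (
--                 p < n - 9
--                 and c == "("
--                 and (query[p - 1].isalnum() or query[p - 5 : p] == "OVER ")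
--                 and query[p + 1 : p + 7] != "SELECT"
--             ):
--                 depth = 1
--             out.append(c)
--             p += 1
--         elif p > n - 9:
--             out.append(c)
--             p += 1
--         elif c == "\n":
--             out.append(" ")
--             p += 1
--             while query[p] == " " and p < n - 9:
--                 p += 1
--         else:
--             if c == ")":
--                 depth -= 1
--             elif c == "(":
--                 depth += 1
--             out.append(c)
--             p += 1
--     return "".join(out)
-- ===== Notes on version B (the rewrite author's own statement) =====
-- stated objective: simpler
-- what changed: A collects the positions of newlines inside qualifying parenthesis regions in a first full scan and then rebuilds the string from that position list in a second slicing pass; B does one single scan that maintains the paren-depth counter and emits characters (collapsing region newlines and following spaces to one space) as it goes, with no position list and no second traversal.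
import Mathlib
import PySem

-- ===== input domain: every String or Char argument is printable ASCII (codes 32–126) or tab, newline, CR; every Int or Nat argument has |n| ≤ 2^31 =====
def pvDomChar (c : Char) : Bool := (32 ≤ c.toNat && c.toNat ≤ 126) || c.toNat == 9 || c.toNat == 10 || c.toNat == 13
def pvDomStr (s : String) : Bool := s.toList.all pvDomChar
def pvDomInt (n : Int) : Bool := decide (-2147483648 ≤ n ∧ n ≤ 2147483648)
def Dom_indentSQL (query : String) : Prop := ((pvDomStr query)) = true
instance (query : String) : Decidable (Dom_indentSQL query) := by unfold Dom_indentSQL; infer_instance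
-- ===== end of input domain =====

-- B collapses A's two phases (collect newline positions inside paren regions, then rebuild from
-- the position list) into one simultaneous scan-and-emit pass with a depth counter (objective:
-- simpler — no position list, no second traversal).
-- The while loops are ported as structural recursion on a fuel counter; every top-level call
-- passes fuel ≥ the loop's step count (each step advances the index), so the 0-fuel base is
-- never reached on the admitted inputs.

-- ===== PORT A =====
-- the four str.replace calls of A, on the char list
def pvReplA (query : String) : List Char :=
  PySem.Chars.replace
    (PySem.Chars.replace
      (PySem.Chars.replace
        (PySem.Chars.replace query.toList "SELECT".toList "\n   SELECT\n    ".toList)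
        "FROM".toList "\n   FROM\n".toList)
      ",".toList ",\n    ".toList)
    "VERTICAPY_SUBTABLE".toList "\nVERTICAPY_SUBTABLE".toList

-- A's opening-parenthesis test: query[j]=='(' and (query[j-1].isalnum() or query[j-5:j]=='OVER ')
-- and query[j+1:j+7]!='SELECT'  (index j-1 is in range whenever this is evaluated: 1 ≤ j < n-9)
def pvQualA (q : List Char) (j : Nat) : Bool :=
  (q.getD j ' ' == '(') &&
  (PySem.Chars.isalnum (q.getD (j-1) ' ') ||
    PySem.List.slice q (some ((j:Int)-5)) (some (j:Int)) == "OVER ".toList) &&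
  !(PySem.List.slice q (some ((j:Int)+1)) (some ((j:Int)+7)) == "SELECT".toList)

-- A's phase 1 (the nested whiles): j = position about to be examined, k = paren depth
-- (k = 0: the outer loop, guard j < n-9; k ≥ 1: the inner loop, whose guard "k>0 and j<n-9"
-- before "j += 1" means positions up to n-9 inclusive are examined).  When the inner loop
-- closes at ')' with k=1 the outer loop re-checks that very ')'; the '(' test never holds on
-- ')', so it just advances — that single re-check step is inlined as the call at j+1.
def pvScanA (q : List Char) : Nat → Nat → Nat → List Nat
  | 0, _, _ => []
  | fuel+1, j, k =>
    if k = 0 then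
      if j < q.length - 9 then
        if pvQualA q j then pvScanA q fuel (j+1) 1 else pvScanA q fuel (j+1) 0
      else []
    else
      if j ≤ q.length - 9 then
        if q.getD j ' ' = '\n' then j :: pvScanA q fuel (j+1) k
        else if q.getD j ' ' = ')' then
          if k = 1 then pvScanA q fuel (j+1) 0 else pvScanA q fuel (j+1) (k-1)
        else if q.getD j ' ' = '(' then pvScanA q fuel (j+1) (k+1)
        else pvScanA q fuel (j+1) k
      else []

-- A's space-skipping loop in phase 2: while query[i] == " " and i < n-9: i += 1
def pvSkipA (q : List Char) : Nat → Nat → Nat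
  | 0, i => i
  | fuel+1, i => if q.getD i ' ' = ' ' ∧ i < q.length - 9 then pvSkipA q fuel (i+1) else i

-- A's phase 2: consume the recorded positions front to back, copying slices between them
def pvEmitA (q : List Char) (i : Nat) : List Nat → List Char
  | [] => PySem.List.slice q (some (i:Int)) (some (q.length:Int))
  | j :: L =>
    PySem.List.slice q (some (i:Int)) (some (j:Int)) ++
    (if q.getD j ' ' ≠ '\n' then q.getD j ' ' :: pvEmitA q i L
     else ' ' :: pvEmitA q (pvSkipA q q.length (j+1)) L)

def indentSQL (query : String) : String :=
  let q := pvReplA query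
  let returnL := pvScanA q (q.length + 1) 1 0
  let i := if q.getD 0 ' ' ≠ '\n' then 0 else 1
  String.ofList (pvEmitA q i returnL)

-- ===== PORT B =====
def pvReplB (query : String) : List Char :=
  PySem.Chars.replace
    (PySem.Chars.replace
      (PySem.Chars.replace
        (PySem.Chars.replace query.toList "SELECT".toList "\n   SELECT\n    ".toList)
        "FROM".toList "\n   FROM\n".toList)
      ",".toList ",\n    ".toList)
    "VERTICAPY_SUBTABLE".toList "\nVERTICAPY_SUBTABLE".toList

-- B's region-entry test (the same Python expression as in A)
def pvQualB (q : List Char) (p : Nat) : Bool :=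
  (q.getD p ' ' == '(') &&
  (PySem.Chars.isalnum (q.getD (p-1) ' ') ||
    PySem.List.slice q (some ((p:Int)-5)) (some (p:Int)) == "OVER ".toList) &&
  !(PySem.List.slice q (some ((p:Int)+1)) (some ((p:Int)+7)) == "SELECT".toList)

-- B's space-skipping loop: while query[p] == " " and p < n-9: p += 1
def pvSkipB (q : List Char) : Nat → Nat → Nat
  | 0, p => p
  | fuel+1, p => if q.getD p ' ' = ' ' ∧ p < q.length - 9 then pvSkipB q fuel (p+1) else p

-- B's single while loop: emit while scanning, depth d = 0 outside a region
def pvLoopB (q : List Char) : Nat → Nat → Nat → List Char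
  | 0, _, _ => []
  | fuel+1, p, d =>
    if p < q.length then
      if d = 0 then
        q.getD p ' ' ::
          pvLoopB q fuel (p+1) (if decide (p < q.length - 9) && pvQualB q p then 1 else 0)
      else if q.length - 9 < p then q.getD p ' ' :: pvLoopB q fuel (p+1) d
      else if q.getD p ' ' = '\n' then ' ' :: pvLoopB q fuel (pvSkipB q q.length (p+1)) d
      else if q.getD p ' ' = ')' then q.getD p ' ' :: pvLoopB q fuel (p+1) (d-1)
      else if q.getD p ' ' = '(' then q.getD p ' ' :: pvLoopB q fuel (p+1) (d+1)
      else q.getD p ' ' :: pvLoopB q fuel (p+1) d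
    else []

def indentSQL_alt (query : String) : String :=
  let q := pvReplB query
  let first := if q.getD 0 ' ' = '\n' then [] else [q.getD 0 ' ']
  String.ofList (first ++ pvLoopB q q.length 1 0)

-- ===== PRECONDITION & SPEC =====
-- Python A evaluates query[0] and raises IndexError exactly on the empty string; that input is excluded.
def Pre_indentSQL (query : String) : Prop := query ≠ ""
instance (query : String) : Decidable (Pre_indentSQL query) := by unfold Pre_indentSQL; infer_instance
def pvWitness_indentSQL : String := "SELECT a, max(b) FROM t"
def Spec_indentSQL (query : String) (out : String) : Prop := out = indentSQL_alt query
instance (query : String) (out : String) : Decidable (Spec_indentSQL query out) := by unfold Spec_indentSQL; infer_instance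

-- ===== CLAIM (what is proved, stated in full; the proofs are below) =====
def Claim_equal_indentSQL : Prop := ∀ (query : String), Dom_indentSQL query → Pre_indentSQL query → Spec_indentSQL query (indentSQL query)

-- ===== LEMMAS AND PROOFS =====

theorem pvQualB_eq (q : List Char) (j : Nat) : pvQualB q j = pvQualA q j := rfl

theorem pvReplB_eq (query : String) : pvReplB query = pvReplA query := rfl

theorem pvSkipB_eq (q : List Char) : ∀ f p, pvSkipB q f p = pvSkipA q f p := by
  intro f
  induction f with
  | zero => intro p; rw [pvSkipB, pvSkipA]
  | succ f ih =>
    intro p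
    rw [pvSkipB, pvSkipA]
    by_cases h : q.getD p ' ' = ' ' ∧ p < q.length - 9
    · rw [if_pos h, if_pos h, ih]
    · rw [if_neg h, if_neg h]

theorem le_pvSkipA (q : List Char) : ∀ f p, p ≤ pvSkipA q f p := by
  intro f
  induction f with
  | zero => intro p; rw [pvSkipA]
  | succ f ih =>
    intro p
    rw [pvSkipA]
    by_cases h : q.getD p ' ' = ' ' ∧ p < q.length - 9
    · rw [if_pos h]; have := ih (p+1); omega
    · rw [if_neg h]

-- the scan's value does not depend on the fuel once the fuel covers the remaining positions
theorem pvScanA_stab (q : List Char) :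
    ∀ f g j k, q.length + 1 - j ≤ f → q.length + 1 - j ≤ g →
      pvScanA q f j k = pvScanA q g j k := by
  intro f
  induction f with
  | zero =>
    intro g j k hf hg
    have hj : q.length + 1 ≤ j := by omega
    cases g with
    | zero => rfl
    | succ g =>
      rw [pvScanA, pvScanA]
      by_cases hk : k = 0
      · rw [if_pos hk, if_neg (by omega : ¬ j < q.length - 9)]
      · rw [if_neg hk, if_neg (by omega : ¬ j ≤ q.length - 9)]
  | succ f ih =>
    intro g j k hf hg
    cases g with
    | zero =>
      have hj : q.length + 1 ≤ j := by omega
      rw [pvScanA, pvScanA]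
      by_cases hk : k = 0
      · rw [if_pos hk, if_neg (by omega : ¬ j < q.length - 9)]
      · rw [if_neg hk, if_neg (by omega : ¬ j ≤ q.length - 9)]
    | succ g =>
      rw [pvScanA, pvScanA]
      by_cases hk : k = 0
      · rw [if_pos hk, if_pos hk]
        by_cases h9 : j < q.length - 9
        · rw [if_pos h9, if_pos h9]
          by_cases hq : pvQualA q j = true
          · rw [if_pos hq, if_pos hq, ih g (j+1) 1 (by omega) (by omega)]
          · rw [if_neg hq, if_neg hq, ih g (j+1) 0 (by omega) (by omega)]
        · rw [if_neg h9, if_neg h9]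
      · rw [if_neg hk, if_neg hk]
        by_cases h9 : j ≤ q.length - 9
        · rw [if_pos h9, if_pos h9]
          by_cases hnl : q.getD j ' ' = '\n'
          · rw [if_pos hnl, if_pos hnl, ih g (j+1) k (by omega) (by omega)]
          · rw [if_neg hnl, if_neg hnl]
            by_cases hrp : q.getD j ' ' = ')'
            · rw [if_pos hrp, if_pos hrp]
              by_cases hk1 : k = 1
              · rw [if_pos hk1, if_pos hk1, ih g (j+1) 0 (by omega) (by omega)]
              · rw [if_neg hk1, if_neg hk1, ih g (j+1) (k-1) (by omega) (by omega)]
            · rw [if_neg hrp, if_neg hrp]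
              by_cases hlp : q.getD j ' ' = '('
              · rw [if_pos hlp, if_pos hlp, ih g (j+1) (k+1) (by omega) (by omega)]
              · rw [if_neg hlp, if_neg hlp, ih g (j+1) k (by omega) (by omega)]
        · rw [if_neg h9, if_neg h9]

-- every recorded position lies at or beyond the scan pointer and carries a newline
theorem pvScanA_mem (q : List Char) :
    ∀ f j k, ∀ x ∈ pvScanA q f j k, j ≤ x ∧ q.getD x ' ' = '\n' := by
  intro f
  induction f with
  | zero => intro j k x hx; rw [pvScanA] at hx; simp at hx
  | succ f ih =>
    intro j k x hx
    rw [pvScanA] at hx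
    by_cases hk : k = 0
    · rw [if_pos hk] at hx
      by_cases h9 : j < q.length - 9
      · rw [if_pos h9] at hx
        by_cases hq : pvQualA q j = true
        · rw [if_pos hq] at hx
          have := ih (j+1) 1 x hx; exact ⟨by omega, this.2⟩
        · rw [if_neg hq] at hx
          have := ih (j+1) 0 x hx; exact ⟨by omega, this.2⟩
      · rw [if_neg h9] at hx; simp at hx
    · rw [if_neg hk] at hx
      by_cases h9 : j ≤ q.length - 9
      · rw [if_pos h9] at hx
        by_cases hnl : q.getD j ' ' = '\n'
        · rw [if_pos hnl] at hx
          rcases List.mem_cons.mp hx with rfl | hx'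
          · exact ⟨le_refl _, hnl⟩
          · have := ih (j+1) k x hx'; exact ⟨by omega, this.2⟩
        · rw [if_neg hnl] at hx
          by_cases hrp : q.getD j ' ' = ')'
          · rw [if_pos hrp] at hx
            by_cases hk1 : k = 1
            · rw [if_pos hk1] at hx
              have := ih (j+1) 0 x hx; exact ⟨by omega, this.2⟩
            · rw [if_neg hk1] at hx
              have := ih (j+1) (k-1) x hx; exact ⟨by omega, this.2⟩
          · rw [if_neg hrp] at hx
            by_cases hlp : q.getD j ' ' = '('
            · rw [if_pos hlp] at hx
              have := ih (j+1) (k+1) x hx; exact ⟨by omega, this.2⟩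
            · rw [if_neg hlp] at hx
              have := ih (j+1) k x hx; exact ⟨by omega, this.2⟩
      · rw [if_neg h9] at hx; simp at hx

-- the scan records nothing once the pointer is past the end of the string
theorem pvScanA_nil (q : List Char) :
    ∀ f j k, q.length ≤ j → pvScanA q f j k = [] := by
  intro f
  induction f with
  | zero => intro j k _; rw [pvScanA]
  | succ f ih =>
    intro j k hj
    rw [pvScanA]
    by_cases hk : k = 0
    · rw [if_pos hk, if_neg (by omega : ¬ j < q.length - 9)]
    · rw [if_neg hk]
      by_cases h9 : j ≤ q.length - 9
      · have hn : q.length = 0 := by omega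
        rw [if_pos h9]
        have hsp : q.getD j ' ' = ' ' := by
          have : q = [] := List.eq_nil_of_length_eq_zero hn
          subst this; rfl
        rw [hsp]
        rw [if_neg (by decide), if_neg (by decide), if_neg (by decide)]
        exact ih (j+1) k (by omega)
      · rw [if_neg h9]

-- skipping spaces does not change what the inner scan records (spaces are inert)
theorem pvScanA_skip (q : List Char) :
    ∀ f i k, k ≠ 0 →
      pvScanA q (q.length + 1) (pvSkipA q f i) k = pvScanA q (q.length + 1) i k := by
  intro f
  induction f with
  | zero => intro i k _; rw [pvSkipA]
  | succ f ih =>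
    intro i k hk
    rw [pvSkipA]
    by_cases h : q.getD i ' ' = ' ' ∧ i < q.length - 9
    · rw [if_pos h, ih (i+1) k hk]
      conv_rhs => rw [pvScanA]
      rw [if_neg hk, if_pos (by omega : i ≤ q.length - 9), h.1]
      rw [if_neg (by decide), if_neg (by decide), if_neg (by decide)]
      exact (pvScanA_stab q q.length (q.length + 1) (i+1) k (by omega) (by omega)).symm
    · rw [if_neg h]

-- peeling one plain character off the front of phase 2's output
theorem pvEmitA_cons (q : List Char) (p : Nat) (L : List Nat)
    (hL : ∀ x ∈ L, p < x ∧ q.getD x ' ' = '\n') (hp : p < q.length) :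
    pvEmitA q p L = q.getD p ' ' :: pvEmitA q (p+1) L := by
  cases L with
  | nil =>
    simp only [pvEmitA, PySem.List.slice_natCast]
    rw [List.drop_eq_getElem_cons hp, List.getD_eq_getElem q ' ' hp]
    have : q.length - p = (q.length - (p+1)) + 1 := by omega
    rw [this, List.take_succ_cons]
  | cons j L' =>
    have hj := hL j (List.mem_cons_self ..)
    simp only [pvEmitA, PySem.List.slice_natCast]
    rw [List.drop_eq_getElem_cons hp, List.getD_eq_getElem q ' ' hp]
    have : j - p = (j - (p+1)) + 1 := by omega
    rw [this, List.take_succ_cons, List.cons_append,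
      if_neg (not_not_intro hj.2), if_neg (not_not_intro hj.2)]

-- MAIN INVARIANT: from any common position and depth, B's one-pass loop produces exactly
-- what A's phase 2 produces on A's phase-1 output
theorem pvMain (q : List Char) :
    ∀ f j k, q.length - j ≤ f →
      pvLoopB q f j k = pvEmitA q j (pvScanA q (q.length + 1) j k) := by
  intro f
  induction f with
  | zero =>
    intro j k hm
    rw [pvLoopB, pvScanA_nil q _ j k (by omega)]
    show _ = PySem.List.slice q (some (j:Int)) (some (q.length:Int))
    rw [PySem.List.slice_natCast]
    have : q.length - j = 0 := by omega
    rw [this, List.take_zero]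
  | succ f ih =>
    intro j k hm
    by_cases hjn : j < q.length
    case neg =>
      rw [pvLoopB, if_neg hjn, pvScanA_nil q _ j k (by omega)]
      show _ = PySem.List.slice q (some (j:Int)) (some (q.length:Int))
      rw [PySem.List.slice_natCast]
      have : q.length - j = 0 := by omega
      rw [this, List.take_zero]
    case pos =>
    have hmem : ∀ k', ∀ x ∈ pvScanA q (q.length + 1) (j+1) k', j < x ∧ q.getD x ' ' = '\n' := by
      intro k' x hx
      have := pvScanA_mem q (q.length + 1) (j+1) k' x hx
      exact ⟨by omega, this.2⟩
    have ihm : ∀ k', pvLoopB q f (j+1) k' = pvEmitA q (j+1) (pvScanA q (q.length + 1) (j+1) k') :=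
      fun k' => ih (j+1) k' (by omega)
    have hstab : ∀ j' k', j < j' →
        pvScanA q q.length j' k' = pvScanA q (q.length + 1) j' k' :=
      fun j' k' h => pvScanA_stab q q.length (q.length + 1) j' k' (by omega) (by omega)
    have hcons : ∀ L, (∀ x ∈ L, j < x ∧ q.getD x ' ' = '\n') →
        pvEmitA q j L = q.getD j ' ' :: pvEmitA q (j+1) L :=
      fun L hL => pvEmitA_cons q j L hL hjn
    rw [pvLoopB, if_pos hjn]
    conv_rhs => rw [pvScanA]
    by_cases hk : k = 0
    · rw [if_pos hk, if_pos hk]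
      subst hk
      by_cases h9 : j < q.length - 9
      · rw [if_pos h9]
        by_cases hq : pvQualA q j = true
        · have hcond : (decide (j < q.length - 9) && pvQualB q j) = true := by
            rw [pvQualB_eq]; simp [hq, h9]
          rw [if_pos hq, hcond, if_pos rfl, hstab (j+1) 1 (by omega), ihm 1,
            hcons _ (hmem 1)]
        · have hcond : (decide (j < q.length - 9) && pvQualB q j) = false := by
            rw [pvQualB_eq]; simp [hq]
          rw [if_neg hq, hcond, if_neg Bool.false_ne_true, hstab (j+1) 0 (by omega), ihm 0,
            hcons _ (hmem 0)]
      · have hcond : (decide (j < q.length - 9) && pvQualB q j) = false := by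
          simp [h9]
        rw [if_neg h9, hcond, if_neg Bool.false_ne_true, ihm 0,
          show pvScanA q (q.length + 1) (j+1) 0 = [] from by
            rw [pvScanA, if_pos rfl, if_neg (by omega)],
          hcons [] (by simp)]
    · rw [if_neg hk, if_neg hk]
      by_cases h9 : q.length - 9 < j
      · rw [if_pos h9, if_neg (by omega : ¬ j ≤ q.length - 9), ihm k,
          show pvScanA q (q.length + 1) (j+1) k = [] from by
            rw [pvScanA, if_neg hk, if_neg (by omega)],
          hcons [] (by simp)]
      · rw [if_neg h9, if_pos (by omega : j ≤ q.length - 9)]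
        by_cases hnl : q.getD j ' ' = '\n'
        · rw [if_pos hnl, if_pos hnl]
          have hskip := le_pvSkipA q q.length (j+1)
          rw [pvSkipB_eq, ih (pvSkipA q q.length (j+1)) k (by omega),
            pvScanA_skip q q.length (j+1) k hk]
          conv_rhs => rw [pvEmitA]
          rw [PySem.List.slice_natCast]
          simp only [Nat.sub_self, List.take_zero, List.nil_append]
          rw [if_neg (not_not_intro hnl), hstab (j+1) k (by omega)]
        · rw [if_neg hnl, if_neg hnl]
          by_cases hrp : q.getD j ' ' = ')'
          · rw [if_pos hrp, if_pos hrp]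
            by_cases hk1 : k = 1
            · subst hk1
              rw [if_pos rfl, hstab (j+1) 0 (by omega), ihm 0, hcons _ (hmem 0)]
            · rw [if_neg hk1, hstab (j+1) (k-1) (by omega), ihm (k-1), hcons _ (hmem (k-1))]
          · rw [if_neg hrp, if_neg hrp]
            by_cases hlp : q.getD j ' ' = '('
            · rw [if_pos hlp, if_pos hlp, hstab (j+1) (k+1) (by omega), ihm (k+1),
                hcons _ (hmem (k+1))]
            · rw [if_neg hlp, if_neg hlp, hstab (j+1) k (by omega), ihm k, hcons _ (hmem k)]

-- str.replace never turns a nonempty string into the empty one (our patterns are nonempty)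
theorem pvGo_ne (old new : List Char) (hnew : new ≠ []) :
    ∀ (fuel : Nat) (l acc : List Char), PySem.Chars.replace.go old new fuel l acc = [] → l = [] ∧ acc = [] := by
  intro fuel
  induction fuel with
  | zero =>
    intro l acc h
    simp only [PySem.Chars.replace.go] at h
    rcases List.append_eq_nil_iff.mp h with ⟨h1, h2⟩
    exact ⟨h2, by simpa using h1⟩
  | succ n ih =>
    intro l acc h
    cases l with
    | nil =>
      simp only [PySem.Chars.replace.go] at h
      exact ⟨rfl, by simpa using h⟩
    | cons c t =>
      exfalso
      simp only [PySem.Chars.replace.go] at h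
      by_cases hp : old.isPrefixOf (c :: t) = true
      · rw [if_pos hp] at h
        rcases List.append_eq_nil_iff.mp (ih _ _ h).2 with ⟨h3, _⟩
        exact hnew (by simpa using h3)
      · rw [if_neg hp] at h
        exact absurd (ih _ _ h).2 (by simp)

theorem pvReplace_ne (s old new : List Char) (hs : s ≠ []) (hold : old ≠ []) (hnew : new ≠ []) :
    PySem.Chars.replace s old new ≠ [] := by
  intro h
  rw [PySem.Chars.replace] at h
  rw [if_neg (by simpa [List.isEmpty_iff] using hold)] at h
  exact hs (pvGo_ne old new hnew _ _ _ h).1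

theorem pvReplA_ne (query : String) (h : query ≠ "") : pvReplA query ≠ [] := by
  have h0 : query.toList ≠ [] := by
    intro hnil
    exact h (by simpa using congrArg String.ofList hnil)
  unfold pvReplA
  apply pvReplace_ne _ _ _ _ (by decide) (by decide)
  apply pvReplace_ne _ _ _ _ (by decide) (by decide)
  apply pvReplace_ne _ _ _ _ (by decide) (by decide)
  exact pvReplace_ne _ _ _ h0 (by decide) (by decide)

-- ===== VERDICT (by name: the statement is the Claim_ definition above) =====
theorem indentSQL_spec : Claim_equal_indentSQL := by
  intro query _ hpre
  unfold Spec_indentSQL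
  show indentSQL query = indentSQL_alt query
  have hne : pvReplA query ≠ [] := pvReplA_ne query hpre
  have hlen : 0 < (pvReplA query).length := List.length_pos_iff.mpr hne
  have hmain : pvLoopB (pvReplA query) (pvReplA query).length 1 0 =
      pvEmitA (pvReplA query) 1 (pvScanA (pvReplA query) ((pvReplA query).length + 1) 1 0) :=
    pvMain (pvReplA query) (pvReplA query).length 1 0 (by omega)
  simp only [indentSQL, indentSQL_alt, pvReplB_eq]
  by_cases h0 : (pvReplA query).getD 0 ' ' = '\n'
  · rw [if_neg (not_not_intro h0), if_pos h0, hmain, List.nil_append]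
  · rw [if_pos h0, if_neg h0, List.singleton_append]
    congr 1
    rw [hmain]
    simpa using pvEmitA_cons (pvReplA query) 0 _
      (fun x hx => ⟨by have := (pvScanA_mem _ _ 1 0 x hx).1; omega, (pvScanA_mem _ _ 1 0 x hx).2⟩) hlen
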